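-- pv_equiv track=rewrite | github.com/peeernzy/guild-loot-bot | commands/items.py | truncate_table
-- ===== SOURCE A (Python) =====
-- def truncate_table(lines: list[str], header_title: str, max_len: int = 1010) -> str:
--     """Build code block table with custom header, truncating to fit max_len chars."""
--     if not lines:
--         return ""
--
--     header = f"```\n{header_title}\n"
--     footer = "\n```"
--     reserve = len(header) + len(footer) + 30  # buffer for truncation text
--     available = max_len - reserve
--
--     table_lines = []
--     current_len = 0
--     line_idx = 0
--
--     while line_idx < len(lines):
--         line = lines[line_idx]
--         test_len = current_len + len(line) + 1  # +"\n"
--         if test_len > available and table_lines: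
--             break
--         table_lines.append(line)
--         current_len = test_len
--         line_idx += 1
--
--     result = header + "\n".join(table_lines)
--     if line_idx < len(lines):
--         truncated_count = len(lines) - line_idx
--         result += f"\n... +{truncated_count} more"
--     result += footer
--     return result
-- ===== SOURCE B (Python) =====
-- def truncate_table(lines: list[str], header_title: str, max_len: int = 1010) -> str:
--     """Build code block table with custom header, truncating to fit max_len chars."""
--     if not lines:
--         return ""
--     available = max_len - (len(header_title) + 39)  # header(5+title) + footer(4) + 30
--     # prefix[i] = total length of lines[0..i] joined by "\n", plus one trailing char
--     prefix = []
--     total = 0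
--     for line in lines:
--         total += len(line) + 1
--         prefix.append(total)
--     # line 0 is always kept; cut at the first later index whose prefix sum overflows
--     cutoff = next((i for i in range(1, len(lines)) if prefix[i] > available), len(lines))
--     result = "```\n" + header_title + "\n" + "\n".join(lines[:cutoff])
--     if cutoff < len(lines):
--         result += f"\n... +{len(lines) - cutoff} more"
--     return result + "\n```"
-- ===== Notes on version B (the rewrite author's own statement) =====
-- stated objective: alternative
-- what changed: Replaces A's single accumulating while-loop (growing table_lines with current_len and break) by precomputed prefix sums of len(line)+1 and a one-step cutoff search, then builds the output from lines[:cutoff].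
import Mathlib
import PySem

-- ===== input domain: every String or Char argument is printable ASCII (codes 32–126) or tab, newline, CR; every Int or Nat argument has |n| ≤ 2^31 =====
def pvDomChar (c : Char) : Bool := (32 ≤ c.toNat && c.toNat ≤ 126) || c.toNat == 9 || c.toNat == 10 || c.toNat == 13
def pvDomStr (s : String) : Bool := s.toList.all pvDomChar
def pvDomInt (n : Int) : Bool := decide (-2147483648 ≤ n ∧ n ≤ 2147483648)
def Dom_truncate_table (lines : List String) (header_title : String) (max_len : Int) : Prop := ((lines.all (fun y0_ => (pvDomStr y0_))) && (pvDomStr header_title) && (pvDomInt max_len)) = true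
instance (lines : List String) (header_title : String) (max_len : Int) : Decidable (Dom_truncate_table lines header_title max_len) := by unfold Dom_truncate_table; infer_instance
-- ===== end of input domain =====

-- B re-decomposes A's single accumulating while-loop into prefix sums + a one-shot cutoff search (objective: simpler/alternative; same cost).

-- ===== PORT A =====
-- A's while-loop: accumulate table_lines, current_len, line_idx; break when the next line overflows and table is nonempty.
def truncate_table_loop (rest : List String) (available : Int)
    (table : List String) (cur : Int) (idx : Int) : List String × Int :=
  match rest with
  | [] => (table, idx)
  | line :: rest' =>
    let test := cur + PySem.Str.len line + 1
    if test > available ∧ table ≠ [] then (table, idx)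
    else truncate_table_loop rest' available (table ++ [line]) test (idx + 1)

def truncate_table (lines : List String) (header_title : String) (max_len : Int) : String :=
  if lines = [] then ""
  else
    let header := "```\n" ++ header_title ++ "\n"
    let footer := "\n```"
    let reserve := PySem.Str.len header + PySem.Str.len footer + 30
    let available := max_len - reserve
    let r := truncate_table_loop lines available [] 0 0
    let result := header ++ PySem.Str.join "\n" r.1
    let result := if r.2 < (lines.length : Int) then
        result ++ ("\n... +" ++ PySem.Int.toStr ((lines.length : Int) - r.2) ++ " more")
      else result
    result ++ footer

-- ===== PORT B =====
-- prefix sums of len(line)+1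
def truncate_table_prefix (rest : List String) (total : Int) : List Int :=
  match rest with
  | [] => []
  | line :: rest' =>
    let t := total + PySem.Str.len line + 1
    t :: truncate_table_prefix rest' t

-- the generator search: first offset (from index 1) whose prefix sum exceeds available, else all
def truncate_table_find (ps : List Int) (available : Int) : Nat :=
  match ps with
  | [] => 0
  | p :: ps' => if p > available then 0 else 1 + truncate_table_find ps' available

def truncate_table_alt (lines : List String) (header_title : String) (max_len : Int) : String :=
  if lines = [] then ""
  else
    let available := max_len - (PySem.Str.len header_title + 39)
    let pref := truncate_table_prefix lines 0
    let cutoff : Nat := 1 + truncate_table_find (pref.drop 1) available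
    let result := "```\n" ++ header_title ++ "\n" ++ PySem.Str.join "\n" (lines.take cutoff)
    let result := if (cutoff : Int) < (lines.length : Int) then
        result ++ ("\n... +" ++ PySem.Int.toStr ((lines.length : Int) - (cutoff : Int)) ++ " more")
      else result
    result ++ "\n```"

-- ===== PRECONDITION & SPEC =====
def Spec_truncate_table (lines : List String) (header_title : String) (max_len : Int) (out : String) : Prop := out = truncate_table_alt lines header_title max_len
instance (lines : List String) (header_title : String) (max_len : Int) (out : String) : Decidable (Spec_truncate_table lines header_title max_len out) := by unfold Spec_truncate_table; infer_instance

-- ===== CLAIM (what is proved, stated in full; the proofs are below) =====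
def Claim_equal_truncate_table : Prop := ∀ (lines : List String) (header_title : String) (max_len : Int), Dom_truncate_table lines header_title max_len → Spec_truncate_table lines header_title max_len (truncate_table lines header_title max_len)

-- ===== LEMMAS AND PROOFS =====

-- Loop/prefix correspondence: once the table is nonempty, A's loop keeps taking while
-- the running prefix sum stays ≤ available, exactly B's find on the prefix list.
theorem truncate_table_loop_eq (rest : List String) (available : Int)
    (acc : List String) (cur : Int) (idx : Int) (hacc : acc ≠ []) :
    truncate_table_loop rest available acc cur idx =
      (acc ++ rest.take (truncate_table_find (truncate_table_prefix rest cur) available),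
       idx + (truncate_table_find (truncate_table_prefix rest cur) available : Int)) := by
  induction rest generalizing acc cur idx with
  | nil => simp [truncate_table_loop, truncate_table_prefix, truncate_table_find]
  | cons line rest' ih =>
    rw [truncate_table_loop]
    simp only [truncate_table_prefix, truncate_table_find]
    by_cases h : cur + PySem.Str.len line + 1 > available
    · rw [if_pos ⟨h, hacc⟩, if_pos h]
      simp
    · rw [if_neg (fun hc => h hc.1), if_neg h]
      rw [ih (acc ++ [line]) _ _ (by simp)]
      refine Prod.ext ?_ ?_
      · simp [Nat.add_comm 1, List.take_succ_cons]
      · simp; ring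

theorem truncate_table_spec_aux (lines : List String) (header_title : String) (max_len : Int) :
    truncate_table lines header_title max_len = truncate_table_alt lines header_title max_len := by
  match lines with
  | [] => rfl
  | line0 :: rest =>
    unfold truncate_table truncate_table_alt
    rw [if_neg (by simp), if_neg (by simp)]
    have hres : PySem.Str.len ("```\n" ++ header_title ++ "\n") + PySem.Str.len "\n```" + 30
        = PySem.Str.len header_title + 39 := by
      simp
      ring
    simp only [hres]
    set available := max_len - (PySem.Str.len header_title + 39) with havail
    -- unfold the first iteration of A's loop: table is empty, so line0 is always taken
    have hstep : truncate_table_loop (line0 :: rest) available [] 0 0 =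
        truncate_table_loop rest available [line0] (PySem.Str.len line0 + 1) 1 := by
      simp [truncate_table_loop]
    rw [hstep, truncate_table_loop_eq rest available [line0] _ 1 (by simp)]
    -- identify B's prefix/drop with the loop's continuation
    have hpre : (truncate_table_prefix (line0 :: rest) 0).drop 1 =
        truncate_table_prefix rest (PySem.Str.len line0 + 1) := by
      simp [truncate_table_prefix]
    rw [hpre]
    set k := truncate_table_find (truncate_table_prefix rest (PySem.Str.len line0 + 1)) available with hk
    have htake : [line0] ++ rest.take k = (line0 :: rest).take (1 + k) := by
      simp [Nat.add_comm 1 k, List.take_succ_cons]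
    have hidx : (1 : Int) + (k : Int) = ((1 + k : Nat) : Int) := by push_cast; ring
    rw [htake, hidx]

-- ===== VERDICT (by name: the statement is the Claim_ definition above) =====
theorem truncate_table_spec : Claim_equal_truncate_table := by
  intro lines header_title max_len _
  exact truncate_table_spec_aux lines header_title max_len
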